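-- pv_equiv track=rewrite | github.com/Mahedros/AdventOfCode2020 | day_06/day_06.py | part_1
-- ===== SOURCE A (Python) =====
-- def part_1(lines):
--     questions = set()
--     total = 0
--     for line in lines:
--         if line == '\n':
--             total += len(questions)
--             questions = set()
--         for char in line.strip():
--             questions.add(char)
--
--     total += len(questions)
--     return total
-- ===== SOURCE B (Python) =====
-- def part_1(lines):
--     groups = []
--     cur = []
--     for line in lines:
--         if line == '\n':
--             groups.append(cur)
--             cur = []
--         else:
--             cur.append(line)
--     groups.append(cur)
--     return sum(len({c for line in g for c in line.strip()}) for g in groups)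
-- ===== Notes on version B (the rewrite author's own statement) =====
-- stated objective: alternative
-- what changed: B first partitions the lines into groups at blank-line delimiters (two-phase: grouping pass, then a sum of per-group set sizes built by a comprehension), instead of A's single pass that flushes a running set and total on each blank line.
import Mathlib
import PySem

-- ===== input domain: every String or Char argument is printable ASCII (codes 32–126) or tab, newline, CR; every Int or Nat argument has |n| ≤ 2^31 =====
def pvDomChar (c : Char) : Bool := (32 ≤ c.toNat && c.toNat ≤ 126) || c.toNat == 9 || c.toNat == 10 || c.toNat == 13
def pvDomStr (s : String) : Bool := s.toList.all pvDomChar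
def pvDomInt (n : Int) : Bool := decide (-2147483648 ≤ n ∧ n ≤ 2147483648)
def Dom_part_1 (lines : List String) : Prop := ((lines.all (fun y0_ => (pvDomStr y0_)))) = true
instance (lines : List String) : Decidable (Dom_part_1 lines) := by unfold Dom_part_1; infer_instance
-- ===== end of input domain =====

-- B partitions lines into groups first, then sums per-group distinct-char counts (alternative decomposition; same cost).


-- ===== PORT A =====
-- single pass: running set of chars, flush count on each "\n" line
def part_1 (lines : List String) : Int :=
  let st := lines.foldl (fun (st : PySem.Set Char × Int) line =>
    let st := if line = "\n" then (PySem.Set.empty, st.2 + PySem.Set.len st.1) else st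
    ((PySem.Str.strip line).toList.foldl PySem.Set.add st.1, st.2)) (PySem.Set.empty, 0)
  st.2 + PySem.Set.len st.1

-- ===== PORT B =====
-- phase 1: partition lines into groups at "\n" delimiters; phase 2: sum per-group distinct-char counts
def part_1_alt (lines : List String) : Int :=
  let p := lines.foldl (fun (p : List (List String) × List String) line =>
    if line = "\n" then (p.1 ++ [p.2], []) else (p.1, p.2 ++ [line])) ([], [])
  let groups := p.1 ++ [p.2]
  (groups.map (fun g =>
    PySem.Set.len (PySem.Set.ofList (g.flatMap (fun line => (PySem.Str.strip line).toList))))).sum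

-- ===== PRECONDITION & SPEC =====
def Spec_part_1 (lines : List String) (out : Int) : Prop := out = part_1_alt lines
instance (lines : List String) (out : Int) : Decidable (Spec_part_1 lines out) := by unfold Spec_part_1; infer_instance

-- ===== CLAIM (what is proved, stated in full; the proofs are below) =====
def Claim_equal_part_1 : Prop := ∀ (lines : List String), Dom_part_1 lines → Spec_part_1 lines (part_1 lines)

-- ===== LEMMAS AND PROOFS =====

-- the set of distinct stripped characters of a group
def pvGset (g : List String) : PySem.Set Char :=
  PySem.Set.ofList (g.flatMap (fun line => (PySem.Str.strip line).toList))

def pvF (g : List String) : Int := PySem.Set.len (pvGset g)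

lemma pvGset_nil : pvGset [] = PySem.Set.empty := rfl

lemma pvOfList_append (xs ys : List Char) :
    PySem.Set.ofList (xs ++ ys) = ys.foldl PySem.Set.add (PySem.Set.ofList xs) := by
  simp [PySem.Set.ofList_eq_foldl, List.foldl_append]

lemma pvGset_snoc (g : List String) (line : String) :
    pvGset (g ++ [line]) = (PySem.Str.strip line).toList.foldl PySem.Set.add (pvGset g) := by
  simp [pvGset, List.flatMap_append, pvOfList_append]

lemma pvStrip_newline : (PySem.Str.strip "\n").toList = [] := by decide

lemma pv_main (lines : List String) :
    ∀ (gs : List (List String)) (cur : List String),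
    (let st := lines.foldl (fun (st : PySem.Set Char × Int) line =>
        let st := if line = "\n" then (PySem.Set.empty, st.2 + PySem.Set.len st.1) else st
        ((PySem.Str.strip line).toList.foldl PySem.Set.add st.1, st.2))
        (pvGset cur, (gs.map pvF).sum)
     st.2 + PySem.Set.len st.1)
    = (let p := lines.foldl (fun (p : List (List String) × List String) line =>
        if line = "\n" then (p.1 ++ [p.2], []) else (p.1, p.2 ++ [line])) (gs, cur)
       ((p.1 ++ [p.2]).map pvF).sum) := by
  induction lines with
  | nil =>
      intro gs cur
      simp [pvF]
  | cons line ls ih =>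
      intro gs cur
      by_cases h : line = "\n"
      · subst h
        simp only [List.foldl_cons, pvStrip_newline, List.foldl_nil]
        have := ih (gs ++ [cur]) []
        simpa [pvGset_nil, pvF] using this
      · simp only [List.foldl_cons, if_neg h]
        have := ih gs (cur ++ [line])
        rw [pvGset_snoc] at this
        simpa using this

-- ===== VERDICT (by name: the statement is the Claim_ definition above) =====
theorem part_1_spec : Claim_equal_part_1 := by
  intro lines _
  show part_1 lines = part_1_alt lines
  have h := pv_main lines [] []
  simp only [pvGset_nil, List.map_nil, List.sum_nil, pvF] at h
  exact h
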